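-- pv_equiv track=rewrite | github.com/fuhaigao/leetcode | 2214.MinimumHealthtoBeatGame.py | minimumHealth
-- ===== SOURCE A (Python) =====
-- from typing import List
--
-- def minimumHealth(damage: List[int], armor: int) -> int:
--     armorUsed, maxDamage, res = False, 0, 1
--     for d in damage:
--         res += d
--         maxDamage = max(maxDamage, d)
--         if not armorUsed and d >= armor:
--             armorUsed = True
--             res -= armor
--     return res if armorUsed else res-maxDamage
-- ===== SOURCE B (Python) =====
-- from typing import List
--
-- def _summary(ds: List[int], armor: int):
--     # divide & conquer: (total, peak, any hit >= armor) of a nonempty segment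
--     if len(ds) == 1:
--         d = ds[0]
--         return (d, d, d >= armor)
--     mid = len(ds) // 2
--     t1, p1, h1 = _summary(ds[:mid], armor)
--     t2, p2, h2 = _summary(ds[mid:], armor)
--     return (t1 + t2, p1 if p1 > p2 else p2, h1 or h2)
--
-- def minimumHealth(damage: List[int], armor: int) -> int:
--     if not damage:
--         return 1
--     total, peak, hit = _summary(damage, armor)
--     if hit:
--         return total + 1 - armor
--     return total + 1 - (peak if peak > 0 else 0)
-- ===== Notes on version B (the rewrite author's own statement) =====
-- stated objective: alternative
-- what changed: Replaces A's stateful linear scan (running sum, running max, armorUsed flag with an in-loop subtraction) by a divide-and-conquer recursion that merges (total, peak, hit) summaries of the two halves and applies one closed-form final expression.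
import Mathlib
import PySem

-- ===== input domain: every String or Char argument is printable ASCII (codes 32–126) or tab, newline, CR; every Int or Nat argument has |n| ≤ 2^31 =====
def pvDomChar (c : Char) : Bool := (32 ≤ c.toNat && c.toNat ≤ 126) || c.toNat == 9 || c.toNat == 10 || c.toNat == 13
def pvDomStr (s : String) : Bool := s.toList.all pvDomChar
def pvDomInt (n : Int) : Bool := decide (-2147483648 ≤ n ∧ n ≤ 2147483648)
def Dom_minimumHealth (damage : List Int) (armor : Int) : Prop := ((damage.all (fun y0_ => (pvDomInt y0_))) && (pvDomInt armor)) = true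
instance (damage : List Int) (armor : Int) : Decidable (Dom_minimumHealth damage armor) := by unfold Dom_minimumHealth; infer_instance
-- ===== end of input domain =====

-- B replaces A's stateful linear scan by a divide-and-conquer summary merge plus one closed-form final expression (objective: alternative).

-- ===== PORT A =====
def minimumHealth (damage : List Int) (armor : Int) : Int :=
  let st := damage.foldl (fun (st : Bool × Int × Int) d =>
    let armorUsed := st.1
    let maxDamage := st.2.1
    let res := st.2.2 + d
    let maxDamage := max maxDamage d
    if !armorUsed && decide (armor ≤ d) then (true, maxDamage, res - armor)
    else (armorUsed, maxDamage, res)) (false, 0, 1)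
  if st.1 then st.2.2 else st.2.2 - st.2.1

-- ===== PORT B =====
-- _summary from Source B; Python slices ds[:mid]/ds[mid:] with 0 ≤ mid ≤ len are exactly take/drop.
-- The [] case is unreachable (minimumHealth_alt only calls it on nonempty lists and both halves of
-- a list of length ≥ 2 are nonempty); Python never reaches it either.
def pvSummary (ds : List Int) (armor : Int) : Int × Int × Bool :=
  match ds with
  | [] => (0, 0, false)
  | [d] => (d, d, decide (armor ≤ d))
  | a :: b :: t =>
      let ds' := a :: b :: t
      let mid := ds'.length / 2
      let s1 := pvSummary (ds'.take mid) armor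
      let s2 := pvSummary (ds'.drop mid) armor
      (s1.1 + s2.1, if s2.2.1 < s1.2.1 then s1.2.1 else s2.2.1, s1.2.2 || s2.2.2)
termination_by ds.length
decreasing_by
  · simp; omega
  · simp; omega

def minimumHealth_alt (damage : List Int) (armor : Int) : Int :=
  match damage with
  | [] => 1
  | _ :: _ =>
    let s := pvSummary damage armor
    if s.2.2 then s.1 + 1 - armor
    else s.1 + 1 - (if 0 < s.2.1 then s.2.1 else 0)

-- ===== PRECONDITION & SPEC =====
def Spec_minimumHealth (damage : List Int) (armor : Int) (out : Int) : Prop := out = minimumHealth_alt damage armor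
instance (damage : List Int) (armor : Int) (out : Int) : Decidable (Spec_minimumHealth damage armor out) := by unfold Spec_minimumHealth; infer_instance

-- ===== CLAIM (what is proved, stated in full; the proofs are below) =====
def Claim_equal_minimumHealth : Prop := ∀ (damage : List Int) (armor : Int), Dom_minimumHealth damage armor → Spec_minimumHealth damage armor (minimumHealth damage armor)

-- ===== LEMMAS AND PROOFS =====

-- max of a nonempty list, as Python max(ds) computes it
def pvMaxL : List Int → Int
  | [] => 0
  | d :: t => t.foldl max d

theorem foldl_max_comm (l : List Int) : ∀ (a b : Int), l.foldl max (max a b) = max a (l.foldl max b) := by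
  induction l with
  | nil => intro a b; simp
  | cons c l ih =>
    intro a b
    simp only [List.foldl_cons]
    rw [max_assoc, ih]

theorem pvMaxL_append (l1 l2 : List Int) (h1 : l1 ≠ []) (h2 : l2 ≠ []) :
    pvMaxL (l1 ++ l2) = max (pvMaxL l1) (pvMaxL l2) := by
  obtain ⟨d, t, rfl⟩ := List.exists_cons_of_ne_nil h1
  obtain ⟨e, t2, rfl⟩ := List.exists_cons_of_ne_nil h2
  simp only [pvMaxL, List.cons_append, List.foldl_append, List.foldl_cons]
  rw [foldl_max_comm]

theorem loopA_char (armor : Int) (l : List Int) :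
    ∀ (used : Bool) (m r : Int),
      l.foldl (fun (st : Bool × Int × Int) d =>
        let armorUsed := st.1
        let maxDamage := st.2.1
        let res := st.2.2 + d
        let maxDamage := max maxDamage d
        if !armorUsed && decide (armor ≤ d) then (true, maxDamage, res - armor)
        else (armorUsed, maxDamage, res)) (used, m, r)
      = (used || l.any (fun d => decide (armor ≤ d)),
         l.foldl max m,
         r + l.sum - (if used = false ∧ l.any (fun d => decide (armor ≤ d)) then armor else 0)) := by
  induction l with
  | nil => intro used m r; simp
  | cons d l ih =>
    intro used m r
    rw [List.foldl_cons]
    cases used with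
    | true =>
      simp only [Bool.not_true, Bool.false_and, Bool.false_eq_true, if_false, ih]
      refine Prod.ext (by simp) (Prod.ext (by simp) ?_)
      simp only [List.sum_cons]
      rw [if_neg (by simp), if_neg (by simp)]
      ring
    | false =>
      by_cases hd : armor ≤ d
      · rw [if_pos (by simp [hd]), ih]
        refine Prod.ext (by simp [hd]) (Prod.ext (by simp) ?_)
        simp only [List.sum_cons, List.any_cons]
        rw [if_neg (by simp), if_pos (by simp [hd])]
        ring
      · rw [if_neg (by simp [hd]), ih]
        refine Prod.ext (by simp [hd]) (Prod.ext (by simp) ?_)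
        simp only [List.sum_cons, List.any_cons, decide_eq_false hd, Bool.false_or]
        split_ifs <;> ring

theorem pvSummary_eq (armor : Int) :
    ∀ (n : ℕ) (ds : List Int), ds.length ≤ n → ds ≠ [] →
      pvSummary ds armor = (ds.sum, pvMaxL ds, ds.any (fun d => decide (armor ≤ d))) := by
  intro n
  induction n with
  | zero => intro ds h hne; cases ds with
    | nil => exact absurd rfl hne
    | cons a t => simp at h
  | succ n ih =>
    intro ds h hne
    match ds with
    | [d] => simp [pvSummary, pvMaxL]
    | a :: b :: t =>
      rw [pvSummary]
      have hlen : (a :: b :: t).length = t.length + 2 := by simp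
      set mid := (a :: b :: t).length / 2 with hmid
      have hm1 : 1 ≤ mid := by omega
      have hm2 : mid < (a :: b :: t).length := by omega
      have hne1 : (a :: b :: t).take mid ≠ [] := by
        intro hc; have := congrArg List.length hc; simp at this; omega
      have hne2 : (a :: b :: t).drop mid ≠ [] := by
        intro hc; have := congrArg List.length hc; simp at this; omega
      have hl1 : ((a :: b :: t).take mid).length ≤ n := by simp; omega
      have hl2 : ((a :: b :: t).drop mid).length ≤ n := by simp; omega
      rw [ih _ hl1 hne1, ih _ hl2 hne2]
      have hsplit : (a :: b :: t).take mid ++ (a :: b :: t).drop mid = a :: b :: t :=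
        List.take_append_drop _ _
      refine Prod.ext ?_ (Prod.ext ?_ ?_)
      · simp only []
        conv_rhs => rw [← hsplit]
        rw [List.sum_append]
      · simp only []
        conv_rhs => rw [← hsplit]
        rw [pvMaxL_append _ _ hne1 hne2]
        rcases le_total (pvMaxL ((a :: b :: t).drop mid)) (pvMaxL ((a :: b :: t).take mid)) with hle | hle
        · rw [max_eq_left hle]; rcases lt_or_eq_of_le hle with h' | h'
          · rw [if_pos h']
          · rw [h']; split_ifs <;> rfl
        · rw [max_eq_right hle, if_neg (not_lt.mpr hle)]
      · simp only []
        conv_rhs => rw [← hsplit]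
        rw [List.any_append]

theorem foldl_max_zero (ds : List Int) (d : Int) :
    List.foldl max 0 (d :: ds) = max (List.foldl max d ds) 0 := by
  rw [List.foldl_cons, foldl_max_comm]
  exact max_comm _ _

-- ===== VERDICT (by name: the statement is the Claim_ definition above) =====
theorem minimumHealth_spec : Claim_equal_minimumHealth := by
  intro damage armor _
  unfold Spec_minimumHealth minimumHealth minimumHealth_alt
  cases damage with
  | nil => simp
  | cons d ds =>
    rw [loopA_char, pvSummary_eq armor (d :: ds).length _ le_rfl (by simp)]
    simp only [Bool.false_or, List.sum_cons]
    by_cases h : ((d :: ds).any (fun x => decide (armor ≤ x))) = true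
    · rw [h]
      simp only [and_self, if_true]
      ring
    · rw [Bool.not_eq_true] at h
      rw [h]
      simp only [Bool.false_eq_true, if_false]
      rw [if_neg (by simp)]
      have : List.foldl max 0 (d :: ds) = max (pvMaxL (d :: ds)) 0 := foldl_max_zero ds d
      rw [this]
      rcases lt_trichotomy (pvMaxL (d :: ds)) 0 with hp | hp | hp
      · rw [max_eq_right hp.le, if_neg (not_lt.mpr hp.le)]; ring
      · rw [hp]; simp; ring
      · rw [max_eq_left hp.le, if_pos hp]; ring
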